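-- pv_equiv track=rewrite | github.com/DankarLisiyGlobus/DANKAR-BASIC | main.py | _process_if
-- ===== SOURCE A (Python) =====
-- def _process_if(lines):
--     """Обработка IF конструкций"""
--     processed_lines = []
--     i = 0
--
--     while i < len(lines):
--         line = lines[i]
--         if line.startswith("IF<<"):
--             # Извлекаем условие после IF
--             condition = line[4:].strip()
--
--             # Извлекаем блок действий до ENDIF
--             action_block = []
--             i += 1
--             while i < len(lines) and lines[i] != "ENDIF":
--                 action_block.append(lines[i])
--                 i += 1
--
--             # Вычисляем позицию конца IF
--             end_position = len(processed_lines) + len(action_block) + 1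
--
--             # Генерируем команды JUMP
--             processed_lines.append(f"JUMP_IF not {condition} >{end_position}")
--             processed_lines.extend(action_block)
--             processed_lines.append(f"# Конец IF")
--
--             i += 1  # Пропускаем ENDIF
--         else:
--             processed_lines.append(line)
--             i += 1
--
--     return processed_lines
-- ===== SOURCE B (Python) =====
-- def _process_if(lines):
--     """Обработка IF конструкций: один плоский проход с back-patching."""
--     processed_lines = []
--     in_if = False
--     jump_idx = 0
--     for line in lines:
--         if in_if:
--             if line == "ENDIF":
--                 processed_lines[jump_idx] += str(len(processed_lines))
--                 processed_lines.append("# Конец IF")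
--                 in_if = False
--             else:
--                 processed_lines.append(line)
--         elif line.startswith("IF<<"):
--             processed_lines.append(f"JUMP_IF not {line[4:].strip()} >")
--             jump_idx = len(processed_lines) - 1
--             in_if = True
--         else:
--             processed_lines.append(line)
--     if in_if:
--         processed_lines[jump_idx] += str(len(processed_lines))
--         processed_lines.append("# Конец IF")
--     return processed_lines
-- ===== Notes on version B (the rewrite author's own statement) =====
-- stated objective: alternative
-- what changed: Replaced A's nested collect-the-block-then-emit loop with a single flat pass that keeps an in_if flag and back-patches the JUMP_IF target index when ENDIF (or end of input) is reached.
import Mathlib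
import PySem

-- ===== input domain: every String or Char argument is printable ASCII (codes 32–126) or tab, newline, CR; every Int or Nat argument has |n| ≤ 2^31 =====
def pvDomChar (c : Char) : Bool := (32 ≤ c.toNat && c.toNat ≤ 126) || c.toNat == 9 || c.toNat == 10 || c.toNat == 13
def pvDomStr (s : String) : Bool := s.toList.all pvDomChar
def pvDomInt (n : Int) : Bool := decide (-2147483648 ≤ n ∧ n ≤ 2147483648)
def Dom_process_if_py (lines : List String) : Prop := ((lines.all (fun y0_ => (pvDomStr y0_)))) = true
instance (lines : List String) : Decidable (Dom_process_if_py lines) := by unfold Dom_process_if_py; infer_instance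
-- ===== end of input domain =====

-- B rewrites A's nested collect-block loop as a single flat pass with an in_if flag and
-- back-patching of the JUMP_IF target (objective: alternative decomposition, same cost).

-- ===== PORT A =====
-- inner while loop of A: collect action_block until "ENDIF", return (block, rest after skipping ENDIF)
def pvCollectA : List String → List String × List String
  | [] => ([], [])
  | l :: rest =>
    if l = "ENDIF" then ([], rest)
    else
      let p := pvCollectA rest
      (l :: p.1, p.2)

theorem pvCollectA_len : ∀ (l : List String), (pvCollectA l).2.length ≤ l.length := by
  intro l
  induction l with
  | nil => simp [pvCollectA]
  | cons x rest ih =>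
    simp only [pvCollectA]
    split
    · simp
    · simpa using Nat.le_succ_of_le ih

-- outer while loop of A, with processed_lines as accumulator
def pvProcessA : List String → List String → List String
  | [], acc => acc
  | line :: rest, acc =>
    if PySem.Str.startswith line "IF<<" then
      let condition := PySem.Str.strip (PySem.Str.slice line (some 4) none)
      let block := (pvCollectA rest).1
      let endPos : Int := (acc.length : Int) + (block.length : Int) + 1
      pvProcessA (pvCollectA rest).2
        (acc ++ ("JUMP_IF not " ++ condition ++ " >" ++ PySem.Int.toStr endPos) :: (block ++ ["# Конец IF"]))
    else
      pvProcessA rest (acc ++ [line])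
termination_by l _ => l.length
decreasing_by
  · exact Nat.lt_succ_of_le (pvCollectA_len rest)
  · simp

def process_if_py (lines : List String) : List String := pvProcessA lines []

-- ===== PORT B =====
-- one step of B's flat loop; state = (processed_lines, in_if, jump_idx)
def pvStepB (s : List String × Bool × Nat) (line : String) : List String × Bool × Nat :=
  let p := s.1
  let inIf := s.2.1
  let j := s.2.2
  if inIf then
    if line = "ENDIF" then
      (p.set j (p.getD j "" ++ PySem.Int.toStr (p.length : Int)) ++ ["# Конец IF"], false, j)
    else
      (p ++ [line], true, j)
  else if PySem.Str.startswith line "IF<<" then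
    (p ++ ["JUMP_IF not " ++ PySem.Str.strip (PySem.Str.slice line (some 4) none) ++ " >"], true, p.length)
  else
    (p ++ [line], false, j)

-- the final 'if in_if:' flush
def pvFlushB (s : List String × Bool × Nat) : List String :=
  if s.2.1 then
    s.1.set s.2.2 (s.1.getD s.2.2 "" ++ PySem.Int.toStr (s.1.length : Int)) ++ ["# Конец IF"]
  else
    s.1

def process_if_py_alt (lines : List String) : List String :=
  pvFlushB (lines.foldl pvStepB ([], false, 0))

-- ===== PRECONDITION & SPEC =====
def Spec_process_if_py (lines : List String) (out : List String) : Prop := out = process_if_py_alt lines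
instance (lines : List String) (out : List String) : Decidable (Spec_process_if_py lines out) := by unfold Spec_process_if_py; infer_instance

-- ===== CLAIM (what is proved, stated in full; the proofs are below) =====
def Claim_equal_process_if_py : Prop := ∀ (lines : List String), Dom_process_if_py lines → Spec_process_if_py lines (process_if_py lines)

-- ===== LEMMAS AND PROOFS =====

theorem pv_set_patch {α : Type} : ∀ (acc : List α) (x : α) (mid : List α) (v : α),
    (acc ++ x :: mid).set acc.length v = acc ++ v :: mid := by
  intro acc x mid v
  induction acc with
  | nil => simp
  | cons a t ih => simp [ih]

theorem pv_getD_mid : ∀ (acc : List String) (x : String) (mid : List String),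
    (acc ++ x :: mid).getD acc.length "" = x := by
  intro acc x mid
  induction acc with
  | nil => simp [List.getD]
  | cons a t ih => simpa [List.getD] using ih

-- B inside an open IF block: it appends lines verbatim until "ENDIF", then patches the jump line.
theorem pvL2 : ∀ (rest : List String)
    (H : ∀ (l acc : List String) (j : Nat), l.length ≤ rest.length →
        pvFlushB (l.foldl pvStepB (acc, false, j)) = pvProcessA l acc)
    (mid acc : List String) (pre : String),
    pvFlushB (rest.foldl pvStepB (acc ++ pre :: mid, true, acc.length)) =
      pvProcessA (pvCollectA rest).2
        (acc ++ (pre ++ PySem.Int.toStr ((acc.length : Int) + (mid.length : Int) + ((pvCollectA rest).1.length : Int) + 1)) ::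
          ((mid ++ (pvCollectA rest).1) ++ ["# Конец IF"])) := by
  intro rest
  induction rest with
  | nil =>
    intro H mid acc pre
    simp only [List.foldl, pvCollectA, pvFlushB, pvProcessA]
    rw [pv_getD_mid, pv_set_patch]
    have hlen : ((acc ++ pre :: mid).length : Int) = (acc.length : Int) + (mid.length : Int) + 1 := by
      simp; omega
    simp [hlen]
    have harg : ((acc.length : Int) + ((mid.length : Int) + 1)) = ((acc.length : Int) + (mid.length : Int) + 1) := by ring
    rw [harg]
  | cons l rest ih =>
    intro H mid acc pre
    by_cases hE : l = "ENDIF"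
    · subst hE
      simp only [List.foldl, pvStepB, if_pos rfl, if_true]
      rw [pv_getD_mid, pv_set_patch]
      have hH : ∀ (l acc : List String) (j : Nat), l.length ≤ rest.length →
          pvFlushB (l.foldl pvStepB (acc, false, j)) = pvProcessA l acc := by
        intro l acc j h; exact H l acc j (by simpa using Nat.le_succ_of_le h)
      have := hH rest (acc ++ (pre ++ PySem.Int.toStr (((acc ++ "ENDIF" :: mid).length : Int))) :: mid ++ ["# Конец IF"]) acc.length (le_refl _)
      simp only [List.cons_append] at this ⊢
      rw [List.append_assoc] at this
      simp only [pvCollectA, if_pos rfl]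
      have hlen : (((acc ++ "ENDIF" :: mid).length : Int)) = (acc.length : Int) + (mid.length : Int) + (([] : List String).length : Int) + 1 := by
        simp; omega
      rw [hlen] at this
      simpa using this
    · have hstep : pvStepB (acc ++ pre :: mid, true, acc.length) l = (acc ++ pre :: (mid ++ [l]), true, acc.length) := by
        simp [pvStepB, hE]
      have hH : ∀ (l acc : List String) (j : Nat), l.length ≤ rest.length →
          pvFlushB (l.foldl pvStepB (acc, false, j)) = pvProcessA l acc := by
        intro l acc j h; exact H l acc j (by simpa using Nat.le_succ_of_le h)
      have := ih hH (mid ++ [l]) acc pre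
      simp only [List.foldl, hstep]
      rw [this]
      simp only [pvCollectA, if_neg hE]
      have harg : ((acc.length : Int) + ((mid ++ [l]).length : Int) + ((pvCollectA rest).1.length : Int) + 1)
          = (acc.length : Int) + (mid.length : Int) + ((l :: (pvCollectA rest).1).length : Int) + 1 := by
        simp; ring
      rw [harg]
      simp [List.append_assoc]

-- main invariant: the flat B loop started outside a block computes A's result
theorem pvL1 : ∀ (n : Nat) (lines acc : List String) (j : Nat), lines.length ≤ n →
    pvFlushB (lines.foldl pvStepB (acc, false, j)) = pvProcessA lines acc := by
  intro n
  induction n with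
  | zero =>
    intro lines acc j h
    have : lines = [] := List.eq_nil_of_length_eq_zero (Nat.le_zero.mp h)
    subst this
    simp [pvFlushB, pvProcessA]
  | succ n ih =>
    intro lines acc j h
    match lines with
    | [] => simp [pvFlushB, pvProcessA]
    | line :: rest =>
      by_cases hIF : PySem.Str.startswith line "IF<<" = true
      · have hIF' : PySem.Chars.startswith line.toList ['I','F','<','<'] = true := by
          simp at hIF; exact hIF
        have hstep : pvStepB (acc, false, j) line =
            (acc ++ ["JUMP_IF not " ++ PySem.Str.strip (PySem.Str.slice line (some 4) none) ++ " >"], true, acc.length) := by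
          simp [pvStepB, hIF']
        have hH : ∀ (l acc : List String) (j : Nat), l.length ≤ rest.length →
            pvFlushB (l.foldl pvStepB (acc, false, j)) = pvProcessA l acc := by
          intro l acc j hl
          exact ih l acc j (by simp at h; omega)
        have := pvL2 rest hH [] acc ("JUMP_IF not " ++ PySem.Str.strip (PySem.Str.slice line (some 4) none) ++ " >")
        simp only [List.foldl, hstep]
        rw [this]
        conv_rhs => rw [pvProcessA]
        simp [hIF']
      · have hIF' : PySem.Chars.startswith line.toList ['I','F','<','<'] = false := by
          simp at hIF; exact hIF
        have hstep : pvStepB (acc, false, j) line = (acc ++ [line], false, j) := by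
          simp [pvStepB, hIF']
        simp only [List.foldl, hstep]
        rw [ih rest (acc ++ [line]) j (by simp at h; omega)]
        simp [pvProcessA, hIF']

-- ===== VERDICT (by name: the statement is the Claim_ definition above) =====
theorem process_if_py_spec : Claim_equal_process_if_py := by
  intro lines _
  unfold Spec_process_if_py process_if_py process_if_py_alt
  exact (pvL1 lines.length lines [] 0 (le_refl _)).symm
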